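-- pv_equiv track=rewrite | github.com/kdh-yu/data-structure | Binary Search/search_skeleton.py | PerfectSquare
-- ===== SOURCE A (Python) =====
-- from math import floor
--
-- def PerfectSquare(x, l, r):
--   if l > r:
--     return -1
--   else:
--     mid = floor((l+r)/2)
--     if mid * mid == x:
--       return mid
--     elif mid * mid > x:
--       return PerfectSquare(x, l, mid-1)
--     else:
--       return PerfectSquare(x, mid+1, r)
-- ===== SOURCE B (Python) =====
-- def _step(x, state):
--     # one transition of the binary-search state machine
--     if state[0] == "done":
--         return state
--     _, l, r = state
--     if l > r:
--         return ("done", -1)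
--     mid = (l + r) // 2   # equals floor((l+r)/2) exactly for |l+r| < 2**53
--     sq = mid * mid
--     if sq == x:
--         return ("done", mid)
--     if sq > x:
--         return ("run", l, mid - 1)
--     return ("run", mid + 1, r)
--
-- def PerfectSquare(x, l, r):
--     # fixed-fuel state-machine iteration: 64 rounds always suffice, since the
--     # interval width at least halves each round and |l|,|r| <= 2**31
--     state = ("run", l, r)
--     for _ in range(64):
--         state = _step(x, state)
--     return state[1] if state[0] == "done" else -1
-- ===== Notes on version B (the rewrite author's own statement) =====
-- stated objective: alternative
-- what changed: Replaced the recursive binary search by a fixed-fuel state machine: a pure step function over a done/run state is iterated 64 times by a plain for-loop (enough because the interval halves each round on the 32-bit domain), with integer // midpoint instead of the float floor((l+r)/2).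
import Mathlib
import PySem

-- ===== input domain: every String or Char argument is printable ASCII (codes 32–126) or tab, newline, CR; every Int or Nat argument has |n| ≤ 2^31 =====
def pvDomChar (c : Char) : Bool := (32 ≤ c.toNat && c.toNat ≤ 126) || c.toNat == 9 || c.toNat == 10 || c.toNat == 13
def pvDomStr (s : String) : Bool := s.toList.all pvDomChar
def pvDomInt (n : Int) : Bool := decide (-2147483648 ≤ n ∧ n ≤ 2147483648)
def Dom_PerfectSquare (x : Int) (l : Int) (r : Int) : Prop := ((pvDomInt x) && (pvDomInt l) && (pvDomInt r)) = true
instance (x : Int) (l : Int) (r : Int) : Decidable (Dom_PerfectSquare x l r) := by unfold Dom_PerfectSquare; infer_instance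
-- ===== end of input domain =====

-- B replaces A's recursive binary search by a fixed-fuel state machine: a step
-- function on a done/run state, iterated 64 times by a for-loop (always enough
-- on the 32-bit domain); same return value on the whole domain.


-- ===== PORT A =====
-- floor((l+r)/2) (float division + floor) is ported as PySem.Int.floordiv (l+r) 2:
-- exact on Dom, since |l+r| ≤ 2^32 < 2^53 makes the float division exact.
def PerfectSquare (x : Int) (l : Int) (r : Int) : Int :=
  if l > r then -1
  else
    let mid := PySem.Int.floordiv (l + r) 2
    if mid * mid = x then mid
    else if mid * mid > x then PerfectSquare x l (mid - 1)
    else PerfectSquare x (mid + 1) r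
termination_by (r + 1 - l).toNat
decreasing_by
  · have h := PySem.Int.floordiv_two_mid_bounds (by omega : l ≤ r); omega
  · have h := PySem.Int.floordiv_two_mid_bounds (by omega : l ≤ r); omega

-- ===== PORT B =====
-- the state of Source B's machine: ("done", v)  or  ("run", l, r)
inductive PSState where
  | done : Int → PSState
  | run : Int → Int → PSState
deriving DecidableEq, Repr

-- Source B's _step: one transition of the state machine
def PSStep (x : Int) (s : PSState) : PSState :=
  match s with
  | .done v => .done v
  | .run l r =>
    if l > r then .done (-1)
    else
      let mid := PySem.Int.floordiv (l + r) 2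
      let sq := mid * mid
      if sq = x then .done mid
      else if sq > x then .run l (mid - 1)
      else .run (mid + 1) r

-- Source B's 'for _ in range(64): state = _step(x, state)', then unpack the state
def PerfectSquare_alt (x : Int) (l : Int) (r : Int) : Int :=
  match (List.range 64).foldl (fun s _ => PSStep x s) (.run l r) with
  | .done v => v
  | .run _ _ => -1

-- ===== PRECONDITION & SPEC =====
def Spec_PerfectSquare (x : Int) (l : Int) (r : Int) (out : Int) : Prop := out = PerfectSquare_alt x l r
instance (x : Int) (l : Int) (r : Int) (out : Int) : Decidable (Spec_PerfectSquare x l r out) := by unfold Spec_PerfectSquare; infer_instance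

-- ===== CLAIM (what is proved, stated in full; the proofs are below) =====
def Claim_equal_PerfectSquare : Prop := ∀ (x : Int) (l : Int) (r : Int), Dom_PerfectSquare x l r → Spec_PerfectSquare x l r (PerfectSquare x l r)

-- ===== LEMMAS AND PROOFS =====

-- iterating the step function n times (the fold only uses the list's length)
def PSIter (x : Int) : Nat → PSState → PSState
  | 0, s => s
  | n + 1, s => PSIter x n (PSStep x s)

theorem foldl_step_eq_iter (x : Int) (L : List Nat) (s : PSState) :
    L.foldl (fun s _ => PSStep x s) s = PSIter x L.length s := by
  induction L generalizing s with
  | nil => rfl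
  | cons a t ih => simpa [PSIter] using ih (PSStep x s)

theorem iter_done (x : Int) (n : Nat) (v : Int) : PSIter x n (.done v) = .done v := by
  induction n with
  | zero => rfl
  | succ n ih => simpa [PSIter, PSStep] using ih

-- with fuel n + 1 and interval width r + 1 - l < 2^n, the machine finishes at A's answer
theorem iter_run (x : Int) (n : Nat) (l r : Int) (hw : r + 1 - l < 2 ^ n) :
    PSIter x (n + 1) (.run l r) = .done (PerfectSquare x l r) := by
  induction n generalizing l r with
  | zero =>
      have hlr : l > r := by norm_num at hw; omega
      simp [PSIter, PSStep, hlr, PerfectSquare]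
  | succ n ih =>
      by_cases hlr : l > r
      · rw [PSIter, PSStep]
        simp only [if_pos hlr]
        rw [iter_done, PerfectSquare, if_pos hlr]
      · have hd := PySem.Int.floordiv_mul_add_mod (l + r) 2
        have he := PySem.Int.mod_two_eq (l + r)
        rw [PSIter, PSStep]
        simp only [if_neg hlr]
        rw [PerfectSquare]
        simp only [if_neg hlr]
        set mid := PySem.Int.floordiv (l + r) 2 with hmid
        by_cases h1 : mid * mid = x
        · simp [h1, iter_done]
        · by_cases h2 : mid * mid > x
          · simp only [if_neg h1, if_pos h2]
            exact ih l (mid - 1) (by push_cast [pow_succ] at hw ⊢; omega)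
          · simp only [if_neg h1, if_neg h2]
            exact ih (mid + 1) r (by push_cast [pow_succ] at hw ⊢; omega)

-- ===== VERDICT (by name: the statement is the Claim_ definition above) =====
theorem PerfectSquare_spec : Claim_equal_PerfectSquare := by
  intro x l r hdom
  unfold Spec_PerfectSquare PerfectSquare_alt
  have hdom' : -2147483648 ≤ l ∧ l ≤ 2147483648 ∧ -2147483648 ≤ r ∧ r ≤ 2147483648 := by
    simp [Dom_PerfectSquare, pvDomInt] at hdom; tauto
  rw [foldl_step_eq_iter, List.length_range,
      show (64 : Nat) = 63 + 1 from rfl,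
      iter_run x 63 l r (by norm_num; omega)]
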